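-- pv_equiv track=rewrite | github.com/sheikalaudeen04/HackerEarth-Python | Cost of Baloons.py | calculate_min_cost
-- ===== SOURCE A (Python) =====
-- def calculate_min_cost(green_cost, purple_cost, participants):
--     total_cost1 = 0
--     total_cost2 = 0
--
--     for participant in participants:
--         first_problem_solved, second_problem_solved = participant
--
--         # Calculate cost for first configuration: green for problem 1, purple for problem 2
--         total_cost1 += first_problem_solved * green_cost + second_problem_solved * purple_cost
--
--         # Calculate cost for second configuration: purple for problem 1, green for problem 2
--         total_cost2 += first_problem_solved * purple_cost + second_problem_solved * green_cost
--
--     # Return the minimum cost between the two configurations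
--     return min(total_cost1, total_cost2)
-- ===== SOURCE B (Python) =====
-- def calculate_min_cost(green_cost, purple_cost, participants):
--     # Column sums of solve-counts, in two staged passes.
--     s1 = sum(first for first, _second in participants)
--     s2 = sum(second for _first, second in participants)
--     # Rearrangement: the minimum of the two pairings is obtained by giving the
--     # cheaper colour to the larger column sum; no configuration costs are built.
--     lo, hi = (green_cost, purple_cost) if green_cost <= purple_cost else (purple_cost, green_cost)
--     big, small = (s1, s2) if s1 >= s2 else (s2, s1)
--     return lo * big + hi * small
-- ===== Notes on version B (the rewrite author's own statement) =====
-- stated objective: alternative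
-- what changed: B never forms the two configuration costs: it computes the two column sums in staged passes and applies the rearrangement argument, pairing the cheaper colour with the larger column sum (min(g,p)*max(s1,s2)+max(g,p)*min(s1,s2)), instead of accumulating both running costs and taking min.
import Mathlib
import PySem

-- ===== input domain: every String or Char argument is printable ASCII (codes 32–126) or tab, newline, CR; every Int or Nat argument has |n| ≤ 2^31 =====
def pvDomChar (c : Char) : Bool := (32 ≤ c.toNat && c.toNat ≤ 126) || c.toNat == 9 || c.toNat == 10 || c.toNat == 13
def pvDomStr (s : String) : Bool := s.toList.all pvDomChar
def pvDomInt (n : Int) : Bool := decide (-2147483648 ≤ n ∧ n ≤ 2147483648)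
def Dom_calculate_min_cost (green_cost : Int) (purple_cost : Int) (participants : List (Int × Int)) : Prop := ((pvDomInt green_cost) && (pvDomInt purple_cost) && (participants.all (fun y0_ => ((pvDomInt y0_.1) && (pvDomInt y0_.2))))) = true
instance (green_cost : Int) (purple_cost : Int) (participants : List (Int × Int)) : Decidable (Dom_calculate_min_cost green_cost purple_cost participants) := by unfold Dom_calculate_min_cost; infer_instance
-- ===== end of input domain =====

-- B replaces the two running configuration costs + min by staged column sums and the
-- rearrangement pairing (cheaper colour × larger sum); objective: alternative algorithm.

-- ===== PORT A =====
-- A: one pass keeping two running configuration cost totals, then min.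
def calculate_min_cost (green_cost : Int) (purple_cost : Int) (participants : List (Int × Int)) : Int :=
  let totals := participants.foldl
    (fun (t : Int × Int) participant =>
      (t.1 + participant.1 * green_cost + participant.2 * purple_cost,
       t.2 + participant.1 * purple_cost + participant.2 * green_cost))
    (0, 0)
  min totals.1 totals.2

-- ===== PORT B =====
-- B: two staged column sums, then the rearrangement pairing; no min over costs.
def calculate_min_cost_alt (green_cost : Int) (purple_cost : Int) (participants : List (Int × Int)) : Int :=
  let s1 := (participants.map (fun pr => pr.1)).sum
  let s2 := (participants.map (fun pr => pr.2)).sum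
  let lohi := if green_cost ≤ purple_cost then (green_cost, purple_cost) else (purple_cost, green_cost)
  let bigsmall := if s1 ≥ s2 then (s1, s2) else (s2, s1)
  lohi.1 * bigsmall.1 + lohi.2 * bigsmall.2

-- ===== PRECONDITION & SPEC =====
def Spec_calculate_min_cost (green_cost : Int) (purple_cost : Int) (participants : List (Int × Int)) (out : Int) : Prop := out = calculate_min_cost_alt green_cost purple_cost participants
instance (green_cost : Int) (purple_cost : Int) (participants : List (Int × Int)) (out : Int) : Decidable (Spec_calculate_min_cost green_cost purple_cost participants out) := by unfold Spec_calculate_min_cost; infer_instance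

-- ===== CLAIM (what is proved, stated in full; the proofs are below) =====
def Claim_equal_calculate_min_cost : Prop := ∀ (green_cost : Int) (purple_cost : Int) (participants : List (Int × Int)), Dom_calculate_min_cost green_cost purple_cost participants → Spec_calculate_min_cost green_cost purple_cost participants (calculate_min_cost green_cost purple_cost participants)

-- ===== LEMMAS AND PROOFS =====
-- A's fold equals the linear combination of the column sums.
lemma pv_fold_totals (g p : Int) (l : List (Int × Int)) (t1 t2 : Int) :
    l.foldl (fun (t : Int × Int) pr => (t.1 + pr.1 * g + pr.2 * p, t.2 + pr.1 * p + pr.2 * g)) (t1, t2)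
      = (t1 + (l.map (fun pr => pr.1)).sum * g + (l.map (fun pr => pr.2)).sum * p,
         t2 + (l.map (fun pr => pr.1)).sum * p + (l.map (fun pr => pr.2)).sum * g) := by
  induction l generalizing t1 t2 with
  | nil => simp
  | cons hd tl ih =>
    simp only [List.foldl_cons, List.map_cons, List.sum_cons, ih]
    exact Prod.ext (by ring) (by ring)

-- Rearrangement on two items: min of the two pairings pairs the smaller cost with the larger sum.
lemma pv_rearrange (g p s1 s2 : Int) :
    min (s1 * g + s2 * p) (s1 * p + s2 * g)
      = (if g ≤ p then (g, p) else (p, g)).1 * (if s1 ≥ s2 then (s1, s2) else (s2, s1)).1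
        + (if g ≤ p then (g, p) else (p, g)).2 * (if s1 ≥ s2 then (s1, s2) else (s2, s1)).2 := by
  by_cases h1 : g ≤ p <;> by_cases h2 : s1 ≥ s2 <;>
      simp only [h1, h2, if_true, if_false]
  · rw [min_eq_left (by nlinarith)]; ring
  · rw [min_eq_right (by nlinarith [Int.lt_iff_add_one_le.mp (not_le.mp h2)])]; ring
  · rw [min_eq_right (by nlinarith [Int.lt_iff_add_one_le.mp (not_le.mp h1)])]; ring
  · rw [min_eq_left (by nlinarith [not_le.mp h1, not_le.mp h2])]; ring

-- ===== VERDICT (by name: the statement is the Claim_ definition above) =====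
theorem calculate_min_cost_spec : Claim_equal_calculate_min_cost := by
  intro g p l _
  unfold Spec_calculate_min_cost calculate_min_cost calculate_min_cost_alt
  simp only [pv_fold_totals, zero_add]
  exact pv_rearrange g p _ _
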